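-- pv_equiv track=rewrite | github.com/marjev/project-euler-pythonic-way | problems/extended_math.py | is_product_of_two_x_digit_numbers
-- ===== SOURCE A (Python) =====
-- import math
--
-- def get_number_of_digits(number):
--     """
--     Returns the number of digits of a natural number.
--
--     Args:
--         number (int): Natural number whose number of digits is returned.
--
--     Returns:
--         int: Number of digits of a natural number.
--
--     Raises:
--         ValueError: If `number` is not a natural number.
--     """
--     if number < 1:
--         raise ValueError('{number} is not a natural number.'.format(number=number))
--
--     return len(str(number))
--
-- def is_product_of_two_x_digit_numbers(number, number_of_digits):
--     """
--     Returns whether the number is a product of two numbers with the `number_of_digits` digits.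
--
--     Args:
--         number (int): Natural number to be evaluated.
--         number_of_digits (int): Number of digits used to evaluate a factor.
--
--     Returns:
--         bool: True if `number` is a product of two numbers with the `number_of_digits` digits. False otherwise.
--
--     Raises:
--         ValueError: If `number` is not a natural number.
--         ValueError: If `number_of_digits` is not a natural number.
--     """
--     if number < 1:
--         raise ValueError('{number} is not a natural number.'.format(number=number))
--
--     if number_of_digits < 1:
--         raise ValueError('Number of digits must be greater than zero.')
--
--     square_root = int(math.sqrt(number))
--     for i in range(square_root, smallest_natural_number(number_of_digits) - 1, -1):
--         factor, remainder = divmod(number, i)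
--         if remainder == 0:
--             number_of_factor_digits = get_number_of_digits(factor)
--             if number_of_factor_digits == number_of_digits:
--                 return True
--             elif number_of_factor_digits > number_of_digits:
--                 return False
--
--     return False
--
-- def smallest_natural_number(number_of_digits):
--     """
--     Returns the smallest natural x-digit number.
--
--     Args:
--         number_of_digits (int): Number of digits of the smallest number.
--
--     Returns:
--         int: The smallest natural number that has `number_of_digits` digits.
--
--     Raises:
--         ValueError: If `number_of_digits` is not a natural number.
--     """
--     if number_of_digits < 1:
--         raise ValueError('Number of digits must be greater than zero.')
--
--     return 10 ** (number_of_digits - 1)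
-- ===== SOURCE B (Python) =====
-- def is_product_of_two_x_digit_numbers(number, number_of_digits):
--     """
--     Returns whether `number` is a product of two numbers with `number_of_digits` digits.
--
--     Alternative implementation: factor `number` by trial division, generate the
--     complete divisor list from the prime-power exponents, then scan it for a
--     divisor d with both d and number // d in [10**(k-1), 10**k).
--     """
--     if number < 1:
--         raise ValueError('{number} is not a natural number.'.format(number=number))
--
--     if number_of_digits < 1:
--         raise ValueError('Number of digits must be greater than zero.')
--
--     low = 10 ** (number_of_digits - 1)
--     high = 10 * low
--
--     # prime factorization of `number` by trial division
--     factors = []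
--     n = number
--     p = 2
--     while p * p <= n:
--         if n % p == 0:
--             exponent = 0
--             while n % p == 0:
--                 n //= p
--                 exponent += 1
--             factors.append((p, exponent))
--         p += 1
--     if n > 1:
--         factors.append((n, 1))
--
--     # complete list of divisors from the prime-power exponents
--     divisors = [1]
--     for prime, exponent in factors:
--         divisors = [d * prime ** e for d in divisors for e in range(exponent + 1)]
--
--     return any(low <= d < high and low <= number // d < high for d in divisors)
-- ===== Notes on version B (the rewrite author's own statement) =====
-- stated objective: alternative
-- what changed: Replaces A's downward interval scan (from isqrt(number) to 10**(k-1) with per-hit digit counting via len(str()) and early exit) by prime factorization via trial division, generation of the complete divisor list from the prime-power exponents, and a separate existence scan for a divisor d with both d and number//d in [10**(k-1), 10**k).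
import Mathlib
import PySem

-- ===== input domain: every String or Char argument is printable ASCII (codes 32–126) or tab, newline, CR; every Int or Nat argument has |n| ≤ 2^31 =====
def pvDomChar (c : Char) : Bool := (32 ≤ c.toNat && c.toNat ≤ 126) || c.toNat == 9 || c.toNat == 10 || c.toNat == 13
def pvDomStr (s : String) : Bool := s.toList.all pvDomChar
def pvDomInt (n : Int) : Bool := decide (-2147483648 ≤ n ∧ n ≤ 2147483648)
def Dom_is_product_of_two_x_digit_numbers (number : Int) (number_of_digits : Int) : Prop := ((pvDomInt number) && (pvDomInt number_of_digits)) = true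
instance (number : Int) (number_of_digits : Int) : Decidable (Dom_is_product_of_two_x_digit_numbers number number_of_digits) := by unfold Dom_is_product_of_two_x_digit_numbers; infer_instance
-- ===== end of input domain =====

-- B replaces A's downward interval scan (with len(str())-digit counting and early exit) by
-- trial-division prime factorization, generation of the complete divisor list, and a separate
-- existence scan; objective: alternative (similar cost).

-- ===== PORT A =====
def get_number_of_digits (number : Int) : Int :=
  if number < 1 then 0  -- Python raises ValueError here; A only calls this with number ≥ 1
  else ((PySem.Int.toChars number).length : Int)  -- len(str(number))

def smallest_natural_number (number_of_digits : Int) : Int :=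
  if number_of_digits < 1 then 0  -- Python raises ValueError here; A only calls this with ≥ 1
  else 10 ^ (number_of_digits - 1).toNat

-- the body of A's "for i in range(square_root, smallest_natural_number(k) - 1, -1)" loop,
-- with its two early exits (return True / return False)
def is_product_loop (number number_of_digits : Int) : List Int → Bool
  | [] => false
  | i :: rest =>
    -- divmod(number, i); every i the loop visits is ≥ 1, so floordiv/mod are exact here
    let factor := PySem.Int.floordiv number i
    let remainder := PySem.Int.mod number i
    if remainder = 0 then
      let d := get_number_of_digits factor
      if d = number_of_digits then true
      else if d > number_of_digits then false
      else is_product_loop number number_of_digits rest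
    else is_product_loop number number_of_digits rest

def is_product_of_two_x_digit_numbers (number : Int) (number_of_digits : Int) : Bool :=
  if number < 1 then false       -- ValueError in Python; excluded by Pre_
  else if number_of_digits < 1 then false  -- ValueError in Python; excluded by Pre_
  else
    -- int(math.sqrt(number)) = isqrt(number), exact for every number ≤ 2^31 (all of Dom)
    let square_root : Int := (number.toNat.sqrt : Int)
    is_product_loop number number_of_digits
      (PySem.List.pyRange square_root (smallest_natural_number number_of_digits - 1) (-1))

-- ===== PORT B =====
-- inner "while n % p == 0: n //= p; exponent += 1": returns (exponent, reduced n);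
-- on Nat because B only ever works with values ≥ 1 here
def pvStrip (p n : Nat) : Nat × Nat :=
  if h : 2 ≤ p ∧ 0 < n ∧ n % p = 0 then
    let s := pvStrip p (n / p)
    (s.1 + 1, s.2)
  else (0, n)
termination_by n
decreasing_by exact Nat.div_lt_self h.2.1 h.1

theorem pvStrip_snd_le (p n : Nat) : (pvStrip p n).2 ≤ n := by
  fun_induction pvStrip p n with
  | case1 n h s ih =>
    have hlt : n / p < n := Nat.div_lt_self h.2.1 h.1
    have hs : s = pvStrip p (n / p) := rfl
    rw [hs]; omega
  | case2 n h => simp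

-- outer "while p * p <= n" trial-division loop, plus the trailing "if n > 1" append
def pvFactor (p n : Nat) : List (Nat × Nat) :=
  if hp : 2 ≤ p ∧ p * p ≤ n then
    if n % p = 0 then
      let s := pvStrip p n
      (p, s.1) :: pvFactor (p + 1) s.2
    else pvFactor (p + 1) n
  else if 1 < n then [(n, 1)] else []
termination_by n + 1 - p
decreasing_by
  · have h1 := pvStrip_snd_le p n
    have h2 : p ≤ p * p := Nat.le_mul_of_pos_left p (by omega)
    omega
  · have h2 : p ≤ p * p := Nat.le_mul_of_pos_left p (by omega)
    omega

-- "divisors = [1]; for prime, exponent in factors: divisors = [d * prime**e for d in divisors for e in range(exponent+1)]"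
def pvDivisors (factors : List (Nat × Nat)) : List Nat :=
  factors.foldl
    (fun divisors pe => divisors.flatMap (fun d => (List.range (pe.2 + 1)).map (fun e => d * pe.1 ^ e)))
    [1]

def is_product_of_two_x_digit_numbers_alt (number : Int) (number_of_digits : Int) : Bool :=
  if number < 1 then false       -- ValueError in Python; excluded by Pre_
  else if number_of_digits < 1 then false  -- ValueError in Python; excluded by Pre_
  else
    let low : Int := 10 ^ (number_of_digits - 1).toNat
    let high : Int := 10 * low
    let divisors := pvDivisors (pvFactor 2 number.toNat)
    divisors.any fun d =>
      decide (low ≤ (d : Int)) && decide ((d : Int) < high) &&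
      decide (low ≤ PySem.Int.floordiv number (d : Int)) &&
      decide (PySem.Int.floordiv number (d : Int) < high)

-- ===== PRECONDITION & SPEC =====
-- Pre_ excludes exactly the inputs on which A raises ValueError (number < 1 or number_of_digits < 1)
def Pre_is_product_of_two_x_digit_numbers (number : Int) (number_of_digits : Int) : Prop :=
  1 ≤ number ∧ 1 ≤ number_of_digits
instance (number : Int) (number_of_digits : Int) : Decidable (Pre_is_product_of_two_x_digit_numbers number number_of_digits) := by unfold Pre_is_product_of_two_x_digit_numbers; infer_instance

def pvWitness_is_product_of_two_x_digit_numbers : Int × Int := (4, 1)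

def Spec_is_product_of_two_x_digit_numbers (number : Int) (number_of_digits : Int) (out : Bool) : Prop := out = is_product_of_two_x_digit_numbers_alt number number_of_digits
instance (number : Int) (number_of_digits : Int) (out : Bool) : Decidable (Spec_is_product_of_two_x_digit_numbers number number_of_digits out) := by unfold Spec_is_product_of_two_x_digit_numbers; infer_instance

-- ===== CLAIM (what is proved, stated in full; the proofs are below) =====
def Claim_equal_is_product_of_two_x_digit_numbers : Prop := ∀ (number : Int) (number_of_digits : Int), Dom_is_product_of_two_x_digit_numbers number number_of_digits → Pre_is_product_of_two_x_digit_numbers number number_of_digits → Spec_is_product_of_two_x_digit_numbers number number_of_digits (is_product_of_two_x_digit_numbers number number_of_digits)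

-- ===== LEMMAS AND PROOFS =====

-- exact length of Nat.toDigitsCore (Mathlib only has the upper bound)
theorem pv_toDigitsCore_len : ∀ (f n : Nat) (l : List Char), 0 < f → n < 10 ^ f →
    (Nat.toDigitsCore 10 f n l).length = Nat.log 10 n + 1 + l.length := by
  intro f
  induction f with
  | zero => intro n l h _; exact absurd h (lt_irrefl 0)
  | succ f ih =>
    intro n l _ hlt
    simp only [Nat.toDigitsCore]
    by_cases h0 : n / 10 = 0
    · have hn10 : n < 10 := by omega
      rw [if_pos h0]
      have hlog : Nat.log 10 n = 0 := Nat.log_eq_zero_iff.mpr (Or.inl hn10)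
      simp only [List.length_cons, hlog]
      omega
    · rw [if_neg h0]
      have hge : 10 ≤ n := by omega
      have hf : 0 < f := by
        rcases Nat.eq_zero_or_pos f with hf0 | hf
        · subst hf0; simp at hlt; omega
        · exact hf
      have hdiv : n / 10 < 10 ^ f := by
        rw [Nat.div_lt_iff_lt_mul (by norm_num : (0:Nat) < 10)]
        calc n < 10 ^ (f + 1) := hlt
          _ = 10 ^ f * 10 := by rw [pow_succ]
      rw [ih (n / 10) _ hf hdiv]
      have hlog : Nat.log 10 n = Nat.log 10 (n / 10) + 1 := by
        have h1 := Nat.log_div_base 10 n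
        have h2 : 0 < Nat.log 10 n := Nat.log_pos (by norm_num) hge
        omega
      simp only [List.length_cons, hlog]
      omega

theorem pv_toChars_len (n : Nat) :
    (PySem.Int.toChars (n : Int)).length = Nat.log 10 n + 1 := by
  have hneg : ¬ ((n : Int) < 0) := by omega
  have hbound : n < 10 ^ (n + 1) := by
    calc n < 10 ^ n := Nat.lt_pow_self (by norm_num)
      _ ≤ 10 ^ (n + 1) := Nat.pow_le_pow_right (by norm_num) (Nat.le_succ n)
  simp only [PySem.Int.toChars, if_neg hneg, Int.toNat_natCast, Nat.toDigits]
  rw [pv_toDigitsCore_len (n + 1) n [] (by omega) hbound]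
  simp

-- str-digit comparisons as power brackets, for factor ≥ 1, number_of_digits ≥ 1
theorem pv_digits_eq_iff (F k : Int) (hF : 1 ≤ F) (hk : 1 ≤ k) :
    (get_number_of_digits F = k ↔ ((10:Int) ^ (k-1).toNat ≤ F ∧ F < 10 ^ k.toNat)) ∧
    (get_number_of_digits F > k ↔ (10:Int) ^ k.toNat ≤ F) := by
  have hF0 : F.toNat ≠ 0 := by omega
  have hget : get_number_of_digits F = ((Nat.log 10 F.toNat + 1 : Nat) : Int) := by
    unfold get_number_of_digits
    rw [if_neg (by omega)]
    rw [show F = ((F.toNat : Nat) : Int) by omega, pv_toChars_len]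
    simp only [Int.toNat_natCast]
  have hbr : ∀ t : Nat, ((10:Int) ^ t ≤ F ↔ t ≤ Nat.log 10 F.toNat) := by
    intro t
    have hcast : ((10:Int) ^ t) = ((10 ^ t : Nat) : Int) := by push_cast; ring
    have h1 : ((10:Int) ^ t ≤ F ↔ 10 ^ t ≤ F.toNat) := by rw [hcast]; omega
    rw [h1]
    exact (Nat.le_log_iff_pow_le (by norm_num) hF0).symm
  have h1 := hbr (k - 1).toNat
  have h2 := hbr k.toNat
  have hkk : k.toNat = (k - 1).toNat + 1 := by omega
  refine ⟨?_, ?_⟩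
  · rw [hget]
    constructor
    · intro h
      refine ⟨h1.mpr (by omega), ?_⟩
      rcases lt_or_ge F ((10:Int) ^ k.toNat) with hlt | hge
      · exact hlt
      · exact absurd (h2.mp hge) (by omega)
    · rintro ⟨ha, hb⟩
      have l1 : (k - 1).toNat ≤ Nat.log 10 F.toNat := h1.mp ha
      have l2 : ¬ k.toNat ≤ Nat.log 10 F.toNat := fun hh => absurd (h2.mpr hh) (by omega)
      omega
  · rw [hget]
    constructor
    · intro h; exact h2.mpr (by omega)
    · intro h; have := h2.mp h; omega

theorem pv_floordiv_toNat (a b : Int) (ha : 0 ≤ a) (hb : 0 < b) :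
    PySem.Int.floordiv a b = ((a.toNat / b.toNat : Nat) : Int) := by
  calc PySem.Int.floordiv a b
      = PySem.Int.floordiv (a.toNat : Int) (b.toNat : Int) := by
        rw [Int.toNat_of_nonneg ha, Int.toNat_of_nonneg hb.le]
    _ = ((a.toNat / b.toNat : Nat) : Int) := PySem.Int.floordiv_natCast _ _

-- A's loop over range(a, b, -1) finds a hit iff one exists in (b, a]
theorem pv_loop_iff (number k a b : Int) (hnum : 1 ≤ number) (hk : 1 ≤ k)
    (hb : 0 ≤ b) (ha : a ≤ number) :
    is_product_loop number k (PySem.List.pyRange a b (-1)) = true ↔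
      ∃ i : Int, b < i ∧ i ≤ a ∧ i ∣ number ∧
        (10:Int) ^ (k-1).toNat ≤ PySem.Int.floordiv number i ∧
        PySem.Int.floordiv number i < 10 ^ k.toNat := by
  have main : ∀ (m : Nat) (a : Int), (a - b).toNat ≤ m → a ≤ number →
      (is_product_loop number k (PySem.List.pyRange a b (-1)) = true ↔
        ∃ i : Int, b < i ∧ i ≤ a ∧ i ∣ number ∧
          (10:Int) ^ (k-1).toNat ≤ PySem.Int.floordiv number i ∧
          PySem.Int.floordiv number i < 10 ^ k.toNat) := by
    intro m
    induction m with
    | zero =>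
      intro a hm ha'
      have hab : a ≤ b := by omega
      rw [PySem.List.pyRange_neg_one_eq_nil hab]
      simp only [is_product_loop]
      constructor
      · intro h; exact absurd h (by simp)
      · rintro ⟨i, h1, h2, -, -, -⟩; omega
    | succ m ih =>
      intro a hm ha'
      by_cases hab : a ≤ b
      · rw [PySem.List.pyRange_neg_one_eq_nil hab]
        simp only [is_product_loop]
        constructor
        · intro h; exact absurd h (by simp)
        · rintro ⟨i, h1, h2, -, -, -⟩; omega
      · have hba : b < a := by omega
        rw [PySem.List.pyRange_neg_one_cons hba]
        simp only [is_product_loop]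
        set F := PySem.Int.floordiv number a with hFdef
        by_cases hdvd : PySem.Int.mod number a = 0
        · rw [if_pos hdvd]
          have hadvd : a ∣ number := (PySem.Int.mod_eq_zero_iff_dvd number a).mp hdvd
          have ha1 : 1 ≤ a := by omega
          have hF1 : 1 ≤ F := by
            rw [hFdef, pv_floordiv_toNat number a (by omega) (by omega)]
            have : 1 ≤ number.toNat / a.toNat := (Nat.one_le_div_iff (by omega)).mpr (by omega)
            omega
          obtain ⟨heq, hgt⟩ := pv_digits_eq_iff F k hF1 hk
          by_cases h1 : get_number_of_digits F = k
          · rw [if_pos h1]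
            obtain ⟨hL, hH⟩ := heq.mp h1
            constructor
            · intro _; exact ⟨a, hba, le_refl a, hadvd, hL, hH⟩
            · intro _; rfl
          · rw [if_neg h1]
            by_cases h2 : get_number_of_digits F > k
            · rw [if_pos h2]
              have hHle : (10:Int) ^ k.toNat ≤ F := hgt.mp h2
              constructor
              · intro h; exact absurd h (by simp)
              · rintro ⟨i, hi1, hi2, hidvd, hiL, hiH⟩
                exfalso
                have hi1' : 1 ≤ i := by omega
                have hle : F ≤ PySem.Int.floordiv number i := by
                  rw [hFdef, pv_floordiv_toNat number a (by omega) (by omega),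
                      pv_floordiv_toNat number i (by omega) (by omega)]
                  have : number.toNat / a.toNat ≤ number.toNat / i.toNat :=
                    Nat.div_le_div_left (by omega : i.toNat ≤ a.toNat) (by omega : 0 < i.toNat)
                  omega
                omega
            · rw [if_neg h2]
              rw [ih (a - 1) (by omega) (by omega)]
              have hFL : F < (10:Int) ^ (k-1).toNat := by
                by_contra hc
                push Not at hc
                rcases lt_or_ge F ((10:Int) ^ k.toNat) with hlt | hge
                · exact h1 (heq.mpr ⟨hc, hlt⟩)
                · exact h2 (hgt.mpr hge)
              constructor
              · rintro ⟨i, hi1, hi2, rest⟩; exact ⟨i, hi1, by omega, rest⟩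
              · rintro ⟨i, hi1, hi2, hidvd, hiL, hiH⟩
                refine ⟨i, hi1, ?_, hidvd, hiL, hiH⟩
                have hne : i ≠ a := by
                  rintro rfl
                  rw [← hFdef] at hiL
                  omega
                omega
        · rw [if_neg hdvd]
          rw [ih (a - 1) (by omega) (by omega)]
          have hndvd : ¬ a ∣ number := fun hdd =>
            hdvd ((PySem.Int.mod_eq_zero_iff_dvd number a).mpr hdd)
          constructor
          · rintro ⟨i, h1, h2, rest⟩; exact ⟨i, h1, by omega, rest⟩
          · rintro ⟨i, h1, h2, hidvd, hiL, hiH⟩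
            refine ⟨i, h1, ?_, hidvd, hiL, hiH⟩
            have hne : i ≠ a := by rintro rfl; exact hndvd hidvd
            omega
  exact main (a - b).toNat a (le_refl _) ha

theorem pv_A_iff (number k : Int) (h1 : 1 ≤ number) (hk : 1 ≤ k) :
    is_product_of_two_x_digit_numbers number k = true ↔
      ∃ i : Int, (10:Int) ^ (k-1).toNat ≤ i ∧ i ≤ (number.toNat.sqrt : Int) ∧ i ∣ number ∧
        (10:Int) ^ (k-1).toNat ≤ PySem.Int.floordiv number i ∧
        PySem.Int.floordiv number i < 10 ^ k.toNat := by
  have hsm : smallest_natural_number k = (10:Int) ^ (k-1).toNat := by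
    unfold smallest_natural_number; rw [if_neg (by omega)]
  have hLpos : (0:Int) < 10 ^ (k-1).toNat := by positivity
  have hsqrt : ((number.toNat.sqrt : Nat) : Int) ≤ number := by
    have := Nat.sqrt_le_self number.toNat
    omega
  unfold is_product_of_two_x_digit_numbers
  rw [if_neg (by omega), if_neg (by omega)]
  simp only [hsm]
  rw [pv_loop_iff number k _ _ h1 hk (by omega) hsqrt]
  constructor
  · rintro ⟨i, hi1, rest⟩; exact ⟨i, by omega, rest⟩
  · rintro ⟨i, hi1, rest⟩; exact ⟨i, by omega, rest⟩

theorem pvStrip_spec (p : Nat) : ∀ n : Nat, 2 ≤ p → 0 < n →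
    n = p ^ (pvStrip p n).1 * (pvStrip p n).2 ∧ ¬ p ∣ (pvStrip p n).2 ∧ 0 < (pvStrip p n).2 := by
  intro n
  induction n using Nat.strong_induction_on with
  | _ n ih =>
    intro hp hn
    rw [pvStrip]
    by_cases h : 2 ≤ p ∧ 0 < n ∧ n % p = 0
    · rw [dif_pos h]
      have hdvd : p ∣ n := Nat.dvd_of_mod_eq_zero h.2.2
      have hlt : n / p < n := Nat.div_lt_self hn (by omega)
      have hpos : 0 < n / p := Nat.div_pos (Nat.le_of_dvd hn hdvd) (by omega)
      obtain ⟨e1, e2, e3⟩ := ih (n / p) hlt hp hpos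
      refine ⟨?_, e2, e3⟩
      calc n = p * (n / p) := (Nat.mul_div_cancel' hdvd).symm
        _ = p * (p ^ (pvStrip p (n / p)).1 * (pvStrip p (n / p)).2) := by rw [← e1]
        _ = p ^ ((pvStrip p (n / p)).1 + 1) * (pvStrip p (n / p)).2 := by ring
    · rw [dif_neg h]
      refine ⟨by simp, ?_, hn⟩
      intro hdvd
      exact h ⟨hp, hn, Nat.dvd_iff_mod_eq_zero.mp hdvd⟩

theorem pvFactor_spec (p n : Nat) :
    2 ≤ p → 0 < n → (∀ m, 2 ≤ m → m ∣ n → p ≤ m) →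
    ((pvFactor p n).map (fun pe => pe.1 ^ pe.2)).prod = n ∧
      ∀ pe ∈ pvFactor p n, Nat.Prime pe.1 := by
  fun_induction pvFactor p n with
  | case1 p n hp2 hdvd0 s ih =>
    intro hp hn hmin
    have hs : s = pvStrip p n := rfl
    obtain ⟨hd, hnd, hpos⟩ := pvStrip_spec p n hp hn
    rw [← hs] at hd hnd hpos
    have hp_dvd : p ∣ n := Nat.dvd_of_mod_eq_zero hdvd0
    have hne1 : n ≠ 1 := by
      have h4 : 2 * 2 ≤ p * p := Nat.mul_le_mul hp hp
      have := hp2.2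
      omega
    have hpmin : p = Nat.minFac n :=
      le_antisymm (hmin _ (Nat.minFac_prime hne1).two_le (Nat.minFac_dvd n))
        (Nat.minFac_le_of_dvd hp hp_dvd)
    have hprime : Nat.Prime p := hpmin ▸ Nat.minFac_prime hne1
    have hs2dvd : s.2 ∣ n := Dvd.intro_left _ hd.symm
    obtain ⟨ihprod, ihprime⟩ := ih (by omega) hpos (fun m h2 hds => by
      have h3 := hmin m h2 (hds.trans hs2dvd)
      have h4 : m ≠ p := by rintro rfl; exact hnd hds
      omega)
    constructor
    · simp only [List.map_cons, List.prod_cons, ihprod]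
      exact hd.symm
    · intro pe hpe
      rcases List.mem_cons.mp hpe with hh | hh
      · rw [hh]; exact hprime
      · exact ihprime pe hh
  | case2 p n hp2 hdvd0 ih =>
    intro hp hn hmin
    have hp_ndvd : ¬ p ∣ n := fun hdd => hdvd0 (Nat.dvd_iff_mod_eq_zero.mp hdd)
    exact ih (by omega) hn (fun m h2 hdn => by
      have h3 := hmin m h2 hdn
      have h4 : m ≠ p := by rintro rfl; exact hp_ndvd hdn
      omega)
  | case3 p n hfail hgt1 =>
    intro hp hn hmin
    have hnp : ¬ p * p ≤ n := by tauto
    have hne1 : n ≠ 1 := by omega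
    have hprime : Nat.Prime n := by
      by_contra hc
      have hsq := Nat.minFac_sq_le_self hn hc
      rw [pow_two] at hsq
      have h2 := (Nat.minFac_prime hne1).two_le
      have h3 := hmin _ h2 (Nat.minFac_dvd n)
      have h5 : p * p ≤ Nat.minFac n * Nat.minFac n := Nat.mul_le_mul h3 h3
      omega
    refine ⟨by simp, ?_⟩
    intro pe hpe
    rcases List.mem_cons.mp hpe with hh | hh
    · rw [hh]; exact hprime
    · simp at hh
  | case4 p n hfail hle1 =>
    intro hp hn hmin
    have : n = 1 := by omega
    subst this
    exact ⟨by simp, by simp⟩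

theorem pv_mem_foldl_divisors (l : List (Nat × Nat)) :
    ∀ (acc : List Nat) (d : Nat), (∀ pe ∈ l, Nat.Prime pe.1) →
    (d ∈ l.foldl (fun divisors pe => divisors.flatMap (fun d => (List.range (pe.2 + 1)).map (fun e => d * pe.1 ^ e))) acc ↔
      ∃ a ∈ acc, ∃ b, b ∣ (l.map (fun pe => pe.1 ^ pe.2)).prod ∧ d = a * b) := by
  induction l with
  | nil =>
    intro acc d _
    simp only [List.foldl_nil, List.map_nil, List.prod_nil]
    constructor
    · intro h; exact ⟨d, h, 1, dvd_refl 1, (mul_one d).symm⟩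
    · rintro ⟨a, ha, b, hb, rfl⟩
      have hb1 : b = 1 := Nat.dvd_one.mp hb
      subst hb1; simpa using ha
  | cons pe rest ih =>
    intro acc d hyp
    simp only [List.foldl_cons, List.map_cons, List.prod_cons]
    rw [ih _ d (fun q hq => hyp q (List.mem_cons_of_mem pe hq))]
    constructor
    · rintro ⟨a', ha', b', hb', rfl⟩
      rcases List.mem_flatMap.mp ha' with ⟨a, ha, hmem⟩
      rcases List.mem_map.mp hmem with ⟨t, ht, rfl⟩
      have ht' : t ≤ pe.2 := by have := List.mem_range.mp ht; omega
      exact ⟨a, ha, pe.1 ^ t * b', mul_dvd_mul (pow_dvd_pow pe.1 ht') hb', by ring⟩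
    · rintro ⟨a, ha, b, hb, rfl⟩
      rcases Nat.dvd_mul.mp hb with ⟨b1, b2, hb1, hb2, hbe⟩
      have hq : Nat.Prime pe.1 := hyp pe List.mem_cons_self
      rcases (Nat.dvd_prime_pow hq).mp hb1 with ⟨t, ht, rfl⟩
      refine ⟨a * pe.1 ^ t,
        List.mem_flatMap.mpr ⟨a, ha, List.mem_map.mpr ⟨t, List.mem_range.mpr (by omega), rfl⟩⟩,
        b2, hb2, by rw [← hbe]; ring⟩

theorem pv_mem_pvDivisors (N : Nat) (hN : 0 < N) (d : Nat) :
    d ∈ pvDivisors (pvFactor 2 N) ↔ d ∣ N := by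
  obtain ⟨hprod, hprime⟩ := pvFactor_spec 2 N (le_refl 2) hN (fun m h2 _ => h2)
  unfold pvDivisors
  rw [pv_mem_foldl_divisors _ [1] d hprime, hprod]
  constructor
  · rintro ⟨a, ha, b, hb, rfl⟩
    have ha1 : a = 1 := by simpa using ha
    subst ha1; simpa using hb
  · intro h; exact ⟨1, by simp, d, h, (one_mul d).symm⟩

theorem pv_B_iff (number k : Int) (h1 : 1 ≤ number) (hk : 1 ≤ k) :
    is_product_of_two_x_digit_numbers_alt number k = true ↔
      ∃ d : Nat, d ∣ number.toNat ∧
        (10:Int) ^ (k-1).toNat ≤ (d : Int) ∧ (d : Int) < 10 * 10 ^ (k-1).toNat ∧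
        (10:Int) ^ (k-1).toNat ≤ PySem.Int.floordiv number (d : Int) ∧
        PySem.Int.floordiv number (d : Int) < 10 * 10 ^ (k-1).toNat := by
  unfold is_product_of_two_x_digit_numbers_alt
  rw [if_neg (by omega), if_neg (by omega)]
  simp only [List.any_eq_true, Bool.and_eq_true, decide_eq_true_eq]
  constructor
  · rintro ⟨d, hmem, ⟨⟨hdL, hdH⟩, hfL⟩, hfH⟩
    exact ⟨d, (pv_mem_pvDivisors number.toNat (by omega) d).mp hmem, hdL, hdH, hfL, hfH⟩
  · rintro ⟨d, hdvd, hdL, hdH, hfL, hfH⟩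
    exact ⟨d, (pv_mem_pvDivisors number.toNat (by omega) d).mpr hdvd, ⟨⟨hdL, hdH⟩, hfL⟩, hfH⟩

-- ===== VERDICT (by name: the statement is the Claim_ definition above) =====
theorem is_product_of_two_x_digit_numbers_spec : Claim_equal_is_product_of_two_x_digit_numbers := by
  intro number k hdom hpre
  obtain ⟨h1, hk⟩ := hpre
  unfold Spec_is_product_of_two_x_digit_numbers
  have hH : (10:Int) ^ k.toNat = 10 * 10 ^ (k-1).toNat := by
    rw [show k.toNat = (k-1).toNat + 1 by omega, pow_succ]; ring
  have hA := pv_A_iff number k h1 hk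
  rw [hH] at hA
  have hB := pv_B_iff number k h1 hk
  have hLpos : (0:Int) < 10 ^ (k-1).toNat := by positivity
  have hNpos : 0 < number.toNat := by omega
  have hNe : ((number.toNat : Nat) : Int) = number := by omega
  rw [Bool.eq_iff_iff, hA, hB]
  constructor
  · rintro ⟨i, hiL, hisq, hidvd, hfL, hfH⟩
    have hi1 : 1 ≤ i := by omega
    have e1 : ((i.toNat : Nat) : Int) = i := by omega
    have hfd : PySem.Int.floordiv number i = ((number.toNat / i.toNat : Nat) : Int) :=
      pv_floordiv_toNat number i (by omega) (by omega)
    refine ⟨i.toNat, ?_, by omega, ?_, ?_, ?_⟩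
    · have : ((i.toNat : Nat) : Int) ∣ ((number.toNat : Nat) : Int) := by
        rw [e1, hNe]; exact hidvd
      exact_mod_cast this
    · -- ↑i.toNat < 10 * 10^(k-1).toNat
      have hsq : i.toNat ≤ Nat.sqrt number.toNat := by omega
      have hmul : i.toNat * i.toNat ≤ number.toNat := Nat.le_sqrt.mp hsq
      have hile : i.toNat ≤ number.toNat / i.toNat := (Nat.le_div_iff_mul_le (by omega)).mpr hmul
      have hfH' := hfH
      rw [hfd] at hfH'
      omega
    · rw [e1]; exact hfL
    · rw [e1]; exact hfH
  · rintro ⟨d, hdvd, hdL, hdH, hfL, hfH⟩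
    have hd1 : 0 < d := by omega
    have hfd : PySem.Int.floordiv number (d : Int) = ((number.toNat / d : Nat) : Int) := by
      have h := pv_floordiv_toNat number (d : Int) (by omega) (by omega)
      rw [Int.toNat_natCast] at h
      exact h
    have hDdvd : number.toNat / d ∣ number.toNat := Nat.div_dvd_of_dvd hdvd
    by_cases hmd : d ≤ number.toNat / d
    · refine ⟨(d : Int), hdL, ?_, ?_, hfL, hfH⟩
      · have hdd : d * d ≤ number.toNat := by
          calc d * d ≤ d * (number.toNat / d) := Nat.mul_le_mul_left d hmd
            _ = number.toNat := Nat.mul_div_cancel' hdvd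
        have hsq : d ≤ Nat.sqrt number.toNat := Nat.le_sqrt.mpr hdd
        omega
      · rw [← hNe]; exact_mod_cast hdvd
    · have hDpos : 0 < number.toNat / d := by
        have := hfL; rw [hfd] at this; omega
      have hNd_eq : number.toNat / (number.toNat / d) = d :=
        Nat.div_div_self hdvd (by omega)
      have hfd2 : PySem.Int.floordiv number ((number.toNat / d : Nat) : Int)
          = ((number.toNat / (number.toNat / d) : Nat) : Int) := by
        have h := pv_floordiv_toNat number ((number.toNat / d : Nat) : Int) (by omega) (by omega)
        rw [Int.toNat_natCast] at h
        exact h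
      refine ⟨((number.toNat / d : Nat) : Int), ?_, ?_, ?_, ?_, ?_⟩
      · have := hfL; rw [hfd] at this; omega
      · have hdd : (number.toNat / d) * (number.toNat / d) ≤ number.toNat := by
          calc (number.toNat / d) * (number.toNat / d)
              ≤ (number.toNat / d) * d := Nat.mul_le_mul_left _ (by omega)
            _ = number.toNat := Nat.div_mul_cancel hdvd
        have hsq : number.toNat / d ≤ Nat.sqrt number.toNat := Nat.le_sqrt.mpr hdd
        omega
      · rw [← hNe]; exact_mod_cast hDdvd
      · rw [hfd2, hNd_eq]; omega
      · rw [hfd2, hNd_eq]; omega
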